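-- pv_equiv track=rewrite | github.com/maojanlin/gAIRRsuite | scripts/parse_contig_realign.py | parse_MD
-- ===== SOURCE A (Python) =====
-- def parse_MD(MD_tag):
--     tmp_num = 0
--     ref_idx = 1 # the sam files are started with 1
--     mis_region = []
--     for char in MD_tag:
--         if char.isdigit():
--             tmp_num = tmp_num*10 + int(char)
--         else:
--             ref_idx += tmp_num
--             tmp_num = 0
--             if char != '^':
--                 mis_region.append(ref_idx)
--                 ref_idx += 1
--     return(mis_region)
-- ===== SOURCE B (Python) =====
-- import re
--
-- def parse_MD(MD_tag):
--     # Tokenize the MD tag into digit-runs and single non-digit characters,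
--     # then walk the token list maintaining the reference index.
--     mis_region = []
--     ref_idx = 1
--     for tok in re.findall(r'\d+|\D', MD_tag):
--         if tok.isdigit():
--             ref_idx += int(tok)
--         elif tok != '^':
--             mis_region.append(ref_idx)
--             ref_idx += 1
--     return mis_region
-- ===== Notes on version B (the rewrite author's own statement) =====
-- stated objective: idiomatic
-- what changed: Replaced A's character-level state machine (manual digit accumulation in tmp_num) by a tokenize-then-iterate decomposition: re.findall(r'\d+|\D') splits the MD tag into digit-run and single-character tokens, and a simple loop over tokens advances the reference index.
import Mathlib
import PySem

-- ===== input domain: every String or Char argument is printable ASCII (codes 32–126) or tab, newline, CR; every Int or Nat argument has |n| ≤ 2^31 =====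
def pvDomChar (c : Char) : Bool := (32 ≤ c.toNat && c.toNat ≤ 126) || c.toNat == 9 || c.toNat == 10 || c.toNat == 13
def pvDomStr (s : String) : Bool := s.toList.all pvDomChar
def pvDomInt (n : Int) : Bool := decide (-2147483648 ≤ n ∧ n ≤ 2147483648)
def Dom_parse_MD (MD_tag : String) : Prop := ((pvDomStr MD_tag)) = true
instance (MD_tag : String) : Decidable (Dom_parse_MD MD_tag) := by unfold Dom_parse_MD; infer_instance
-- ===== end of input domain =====

-- B replaces A's character-level parse state machine by a tokenize-then-iterate decomposition
-- (digit-runs and single non-digit characters as tokens); same result, idiomatic objective.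

-- ===== PORT A =====
-- int(char) for a single digit character (A only evaluates it on digit chars; exact there)
def pvDigitVal (c : Char) : Int := (c.toNat : Int) - 48

-- one iteration of A's 'for char in MD_tag' loop over state (tmp_num, ref_idx, mis_region)
def pvStepA (s : Int × Int × List Int) (c : Char) : Int × Int × List Int :=
  let (tmp_num, ref_idx, mis_region) := s
  if PySem.Chars.isdigit c then
    (tmp_num * 10 + pvDigitVal c, ref_idx, mis_region)
  else
    let ref_idx := ref_idx + tmp_num
    let tmp_num := 0
    if c ≠ '^' then (tmp_num, ref_idx + 1, mis_region ++ [ref_idx])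
    else (tmp_num, ref_idx, mis_region)

def parse_MD (MD_tag : String) : List Int :=
  (MD_tag.toList.foldl pvStepA (0, 1, [])).2.2

-- ===== PORT B =====
-- re.findall(r'\d+|\D', s): ported by hand as a greedy left-to-right scan —
-- a maximal digit-run, or a single non-digit character, per token (exact for this regex).
def pvTokens : List Char → List (List Char)
  | [] => []
  | c :: cs =>
    if PySem.Chars.isdigit c then
      (c :: cs.takeWhile PySem.Chars.isdigit) :: pvTokens (cs.dropWhile PySem.Chars.isdigit)
    else
      [c] :: pvTokens cs
termination_by cs => cs.length
decreasing_by
  · have := List.length_dropWhile_le (p := PySem.Chars.isdigit) (l := cs); simpa using Nat.lt_succ_of_le this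
  · simp

-- int(tok) for a token that passed tok.isdigit() (nonempty, all digits; exact there)
def pvIntOfDigits (t : List Char) : Int := t.foldl (fun a c => a * 10 + pvDigitVal c) 0

-- one iteration of B's loop over the token list, state (ref_idx, mis_region)
def pvStepB (s : Int × List Int) (t : List Char) : Int × List Int :=
  let (ref_idx, mis_region) := s
  if PySem.Chars.strIsdigit t then (ref_idx + pvIntOfDigits t, mis_region)
  else if t ≠ ['^'] then (ref_idx + 1, mis_region ++ [ref_idx])
  else s

def parse_MD_alt (MD_tag : String) : List Int :=
  ((pvTokens MD_tag.toList).foldl pvStepB (1, [])).2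

-- ===== PRECONDITION & SPEC =====
def Spec_parse_MD (MD_tag : String) (out : List Int) : Prop := out = parse_MD_alt MD_tag
instance (MD_tag : String) (out : List Int) : Decidable (Spec_parse_MD MD_tag out) := by unfold Spec_parse_MD; infer_instance

-- ===== CLAIM (what is proved, stated in full; the proofs are below) =====
def Claim_equal_parse_MD : Prop := ∀ (MD_tag : String), Dom_parse_MD MD_tag → Spec_parse_MD MD_tag (parse_MD MD_tag)

-- ===== LEMMAS AND PROOFS =====

-- the head of dropWhile p never satisfies p
lemma dropWhile_head_false {p : Char → Bool} {cs rs : List Char} {r : Char}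
    (h : cs.dropWhile p = r :: rs) : p r = false := by
  induction cs with
  | nil => simp [List.dropWhile] at h
  | cons a as ih =>
    rw [List.dropWhile_cons] at h
    split at h
    · exact ih h
    · next hp => cases h; simpa using hp

-- A's loop absorbs a run of digits into tmp_num exactly as pvIntOfDigits folds them
lemma foldA_digits (ds : List Char) (h : ∀ c ∈ ds, PySem.Chars.isdigit c) :
    ∀ (rest : List Char) (tmp ref : Int) (mis : List Int),
      (ds ++ rest).foldl pvStepA (tmp, ref, mis)
        = rest.foldl pvStepA (ds.foldl (fun a c => a * 10 + pvDigitVal c) tmp, ref, mis) := by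
  induction ds with
  | nil => intro rest tmp ref mis; simp
  | cons d ds ih =>
      intro rest tmp ref mis
      have hd : PySem.Chars.isdigit d := h d (List.mem_cons_self ..)
      simp only [List.cons_append, List.foldl_cons, pvStepA, hd, if_pos]
      exact ih (fun c hc => h c (List.mem_cons_of_mem _ hc)) rest _ ref mis

-- main invariant: with tmp_num = 0, A's scan from (ref, mis) equals B's token loop
lemma main_inv (n : Nat) : ∀ (cs : List Char), cs.length ≤ n → ∀ (ref : Int) (mis : List Int),
    (cs.foldl pvStepA (0, ref, mis)).2.2 = ((pvTokens cs).foldl pvStepB (ref, mis)).2 := by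
  induction n with
  | zero =>
      intro cs hlen ref mis
      have : cs = [] := List.length_eq_zero_iff.mp (Nat.le_zero.mp hlen)
      subst this; simp [pvTokens]
  | succ n ih =>
      intro cs hlen ref mis
      match cs with
      | [] => simp [pvTokens]
      | c :: cs =>
        by_cases hd : PySem.Chars.isdigit c
        · -- A consumes the whole digit-run c :: takeWhile …; B uses one num token
          rw [pvTokens]
          simp only [hd, if_pos]
          have hsplit : c :: cs = (c :: cs.takeWhile PySem.Chars.isdigit)
              ++ cs.dropWhile PySem.Chars.isdigit := by
            simp [List.takeWhile_append_dropWhile]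
          have hall : ∀ x ∈ c :: cs.takeWhile PySem.Chars.isdigit, PySem.Chars.isdigit x := by
            intro x hx
            rcases List.mem_cons.mp hx with h1 | h2
            · exact h1 ▸ hd
            · exact List.mem_takeWhile_imp h2
          rw [hsplit, foldA_digits _ hall]
          have hisd : PySem.Chars.strIsdigit (c :: cs.takeWhile PySem.Chars.isdigit) = true := by
            simp only [PySem.Chars.strIsdigit, List.isEmpty_cons, Bool.not_false, Bool.true_and]
            exact List.all_eq_true.mpr hall
          simp only [List.foldl_cons, pvStepB, hisd, if_pos]
          have hlen' : (cs.dropWhile PySem.Chars.isdigit).length ≤ n := by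
            have h1 := List.length_dropWhile_le (p := PySem.Chars.isdigit) (l := cs)
            have h2 : cs.length ≤ n := by simpa using Nat.lt_succ_iff.mp (Nat.lt_of_lt_of_le (Nat.lt_succ_of_le (Nat.le_refl _)) hlen)
            omega
          set v : Int := pvIntOfDigits (c :: cs.takeWhile PySem.Chars.isdigit) with hv
          have hvfold : (cs.takeWhile PySem.Chars.isdigit).foldl
              (fun a c => a * 10 + pvDigitVal c) (0 * 10 + pvDigitVal c) = v := rfl
          rw [hvfold]
          -- now the rest starts with a non-digit (or is empty): one more unfolding step
          match hrest : cs.dropWhile PySem.Chars.isdigit with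
          | [] => simp [pvTokens]
          | r :: rs =>
            have hr : PySem.Chars.isdigit r = false := dropWhile_head_false hrest
            have hlenrs : rs.length ≤ n := by
              have : (r :: rs).length ≤ n := hrest ▸ hlen'
              simp at this; omega
            rw [pvTokens]
            simp only [hr, Bool.false_eq_true, if_false]
            have hrd : PySem.Chars.strIsdigit [r] = false := by
              simp [PySem.Chars.strIsdigit, hr]
            by_cases hc : r = '^'
            · subst hc
              simp only [List.foldl_cons, pvStepA, pvStepB, hr, hrd, Bool.false_eq_true,
                if_false, ne_eq, not_true_eq_false]
              have := ih rs hlenrs (ref + v) mis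
              simpa using this
            · have hne : ¬ ([r] = ['^']) := by simpa using hc
              simp only [List.foldl_cons, pvStepA, pvStepB, hr, hrd, Bool.false_eq_true,
                if_false, ne_eq, hc, hne, not_false_eq_true, reduceIte]
              have := ih rs hlenrs (ref + v + 1) (mis ++ [ref + v])
              simpa using this
        · -- single non-digit character: one token, one step on each side
          rw [pvTokens]
          simp only [hd, Bool.false_eq_true, if_false]
          have hrd : PySem.Chars.strIsdigit [c] = false := by
            simp [PySem.Chars.strIsdigit]; simpa using hd
          have hlen' : cs.length ≤ n := by simp at hlen; omega
          by_cases hc : c = '^'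
          · subst hc
            simp only [List.foldl_cons, pvStepA, pvStepB, hd, hrd, Bool.false_eq_true,
              if_false, ne_eq, not_true_eq_false]
            have := ih cs hlen' ref mis
            simpa using this
          · have hne : ¬ ([c] = ['^']) := by simpa using hc
            simp only [List.foldl_cons, pvStepA, pvStepB, hd, hrd, Bool.false_eq_true,
              if_false, ne_eq, hc, hne, not_false_eq_true, reduceIte]
            have := ih cs hlen' (ref + 1) (mis ++ [ref])
            simpa using this

-- ===== VERDICT (by name: the statement is the Claim_ definition above) =====
theorem parse_MD_spec : Claim_equal_parse_MD := by
  intro MD_tag _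
  unfold Spec_parse_MD parse_MD parse_MD_alt
  exact main_inv MD_tag.toList.length MD_tag.toList (Nat.le_refl _) 1 []
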